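-- pv_equiv track=rewrite | github.com/jeff87654/Lifting | check_bogus_status.py | expected_combos
-- ===== SOURCE A (Python) =====
-- from math import comb
--
-- NR_TG = {2:1, 3:2, 4:5, 5:5, 6:16, 7:7, 8:50, 9:34, 10:45, 11:8,
--          12:301, 13:9, 14:63, 15:104, 16:1954, 17:10, 18:983}
--
-- def expected_combos(parts):
--     counts = {}
--     for d in parts:
--         counts[d] = counts.get(d, 0) + 1
--     total = 1
--     for d, k in counts.items():
--         total *= comb(NR_TG[d] + k - 1, k)
--     return total
-- ===== SOURCE B (Python) =====
-- NR_TG = {2:1, 3:2, 4:5, 5:5, 6:16, 7:7, 8:50, 9:34, 10:45, 11:8,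
--          12:301, 13:9, 14:63, 15:104, 16:1954, 17:10, 18:983}
--
-- def expected_combos(parts):
--     # one streaming pass: per distinct part keep (count m, running multiset-combination value);
--     # the incremental exact division v*(NR_TG[d]+m-1)//m replaces math.comb entirely
--     state = {}
--     for d in parts:
--         m, v = state.get(d, (0, 1))
--         m += 1
--         state[d] = (m, v * (NR_TG[d] + m - 1) // m)
--     total = 1
--     for m, v in state.values():
--         total *= v
--     return total
-- ===== Notes on version B (the rewrite author's own statement) =====
-- stated objective: alternative
-- what changed: Replaces the two-phase count-then-math.comb product with a single streaming pass that maintains per-part (count, value) state and builds each multiset-combination incrementally by an exact multiply-divide step, with no call to math.comb.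
import Mathlib
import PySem

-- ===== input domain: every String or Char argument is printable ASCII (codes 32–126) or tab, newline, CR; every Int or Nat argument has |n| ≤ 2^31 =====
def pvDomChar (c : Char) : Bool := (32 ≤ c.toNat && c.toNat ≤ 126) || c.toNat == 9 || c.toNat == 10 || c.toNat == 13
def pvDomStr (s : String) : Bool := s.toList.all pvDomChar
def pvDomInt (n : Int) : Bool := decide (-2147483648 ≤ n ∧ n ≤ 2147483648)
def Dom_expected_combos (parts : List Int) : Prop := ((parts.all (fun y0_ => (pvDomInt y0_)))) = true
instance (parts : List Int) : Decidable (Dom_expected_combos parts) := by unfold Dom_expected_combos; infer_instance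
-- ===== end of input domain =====

-- B replaces A's count-then-math.comb product by one streaming pass building each
-- multiset-combination value incrementally with an exact multiply-divide step (alternative decomposition).

-- the module constant NR_TG (both Pythons read the same table; lookup outside its keys is excluded by Pre_)
def nrTG (d : Int) : Int :=
  (PySem.Dict.ofList [((2:Int),(1:Int)),(3,2),(4,5),(5,5),(6,16),(7,7),(8,50),(9,34),(10,45),
    (11,8),(12,301),(13,9),(14,63),(15,104),(16,1954),(17,10),(18,983)]).getD d 0

-- ===== PORT A =====
-- math.comb(n, k) on the nonnegative arguments Pre_ admits
def pyComb (n k : Int) : Int := (Nat.choose n.toNat k.toNat : Int)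

def expected_combos (parts : List Int) : Int :=
  (parts.foldl (fun c d => c.insert d (c.getD d 0 + 1)) PySem.Dict.empty).items.foldl
    (fun total p => total * pyComb (nrTG p.1 + p.2 - 1) p.2) 1

-- ===== PORT B =====
-- body of B's loop: m, v = state.get(d, (0, 1)); m += 1; state[d] = (m, v*(NR_TG[d]+m-1)//m)
def bStep (s : PySem.Dict Int (Int × Int)) (d : Int) : PySem.Dict Int (Int × Int) :=
  let mv := s.getD d (0, 1)
  let m := mv.1 + 1
  s.insert d (m, PySem.Int.floordiv (mv.2 * (nrTG d + m - 1)) m)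

def expected_combos_alt (parts : List Int) : Int :=
  (parts.foldl bStep PySem.Dict.empty).values.foldl (fun total p => total * p.2) 1

-- ===== PRECONDITION & SPEC =====
-- Pre_ excludes parts outside NR_TG's keys 2..18, on which both Pythons raise KeyError
def Pre_expected_combos (parts : List Int) : Prop := ∀ d ∈ parts, 2 ≤ d ∧ d ≤ 18
instance (parts : List Int) : Decidable (Pre_expected_combos parts) := by unfold Pre_expected_combos; infer_instance
def pvWitness_expected_combos : List Int := [2, 3, 2, 16]

def Spec_expected_combos (parts : List Int) (out : Int) : Prop := out = expected_combos_alt parts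
instance (parts : List Int) (out : Int) : Decidable (Spec_expected_combos parts out) := by unfold Spec_expected_combos; infer_instance

-- ===== CLAIM (what is proved, stated in full; the proofs are below) =====
def Claim_equal_expected_combos : Prop := ∀ (parts : List Int), Dom_expected_combos parts → Pre_expected_combos parts → Spec_expected_combos parts (expected_combos parts)

-- ===== LEMMAS AND PROOFS =====

-- the per-key update B's loop performs on the (count, value) pair stored at d
def bUpd (d : Int) (p : Int × Int) : Int × Int :=
  (p.1 + 1, PySem.Int.floordiv (p.2 * (nrTG d + (p.1 + 1) - 1)) (p.1 + 1))

theorem bStep_eq (s : PySem.Dict Int (Int × Int)) (d : Int) :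
    bStep s d = s.insert d (bUpd d (s.getD d (0, 1))) := rfl

theorem nrTG_pos (d : Int) (h2 : 2 ≤ d) (h18 : d ≤ 18) : 1 ≤ nrTG d := by
  interval_cases d <;> decide

-- B's loop, read at one key: iterate bUpd d as often as d occurs
theorem getD_foldl_bStep (l : List Int) (st : PySem.Dict Int (Int × Int)) (d : Int) :
    (l.foldl bStep st).getD d (0, 1) = (bUpd d)^[l.count d] (st.getD d (0, 1)) := by
  induction l generalizing st with
  | nil => rfl
  | cons x l ih =>
    simp only [List.foldl_cons, ih, bStep_eq, List.count_cons]
    by_cases hx : x = d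
    · subst hx
      simp [PySem.Dict.getD_insert_self, Function.iterate_succ_apply]
    · rw [PySem.Dict.getD_insert, if_neg (by omega)]
      simp [hx]

-- the incremental exact division really builds the multiset-combination value
theorem iterate_bUpd (d : Int) (N : Nat) (hNe : nrTG d = (N : Int)) (hN1 : 1 ≤ N) (k : Nat) :
    (bUpd d)^[k] ((0 : Int), (1 : Int)) =
      ((k : Int), (Nat.choose (N + k - 1) k : Int)) := by
  induction k with
  | zero => simp
  | succ k ih =>
    rw [Function.iterate_succ_apply', ih]
    unfold bUpd
    have harg : (Nat.choose (N + k - 1) k : Int) * (nrTG d + ((k : Int) + 1) - 1) =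
        ((Nat.choose (N + k - 1) k * (N + k) : Nat) : Int) := by
      rw [hNe]; push_cast; ring
    have hdiv : (Nat.choose (N + k - 1) k * (N + k)) / (k + 1) = Nat.choose (N + k) (k + 1) := by
      have hrec := Nat.add_one_mul_choose_eq (N + k - 1) k
      have hs : N + k - 1 + 1 = N + k := by omega
      rw [hs] at hrec
      rw [Nat.mul_comm, hrec, Nat.mul_div_cancel _ (by omega)]
    have hk1 : ((k : Int) + 1) = ((k + 1 : Nat) : Int) := by push_cast; ring
    have hidx : N + (k + 1) - 1 = N + k := by omega
    rw [harg, hk1, PySem.Int.floordiv_natCast, hdiv, hidx]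

-- keys of B's state dict, via the library insert-loop lemma
theorem keys_foldl_bStep (parts : List Int) :
    (parts.foldl bStep PySem.Dict.empty).keys = PySem.Set.ofList parts := by
  have h : parts.foldl bStep PySem.Dict.empty =
      parts.foldl (fun s x => s.insert x (bUpd x (s.getD x (0, 1)))) PySem.Dict.empty := rfl
  rw [h, PySem.Dict.keys_foldl_insert, PySem.Dict.keys_empty, PySem.Set.update_nil_left]

theorem nodup_keys_foldl_bStep (parts : List Int) :
    (parts.foldl bStep PySem.Dict.empty).keys.Nodup := by
  rw [keys_foldl_bStep]
  exact PySem.Set.nodup_ofList parts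

-- ===== VERDICT (by name: the statement is the Claim_ definition above) =====
theorem expected_combos_spec : Claim_equal_expected_combos := by
  intro parts _ hpre
  unfold Spec_expected_combos expected_combos expected_combos_alt
  -- A's first loop is Counter(parts)
  rw [PySem.Dict.foldl_insert_getD_add_one_eq_counter, PySem.Dict.items_counter]
  -- B's values are its keys' stored pairs
  rw [PySem.Dict.values_eq_map_keys _ (nodup_keys_foldl_bStep parts) (0, 1),
      keys_foldl_bStep]
  rw [List.foldl_map, List.foldl_map]
  apply PySem.List.foldl_congr_mem
  intro acc d hd
  have hdp : d ∈ parts := (PySem.Set.mem_ofList parts d).1 hd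
  obtain ⟨h2, h18⟩ := hpre d hdp
  have hN := nrTG_pos d h2 h18
  have hNe : nrTG d = ((nrTG d).toNat : Int) := by omega
  have hN1 : 1 ≤ (nrTG d).toNat := by omega
  rw [getD_foldl_bStep, PySem.Dict.getD_empty,
      iterate_bUpd d (nrTG d).toNat hNe hN1]
  have hc1 : (nrTG d + (parts.count d : Int) - 1).toNat = (nrTG d).toNat + parts.count d - 1 := by
    omega
  have hc2 : ((parts.count d : Int)).toNat = parts.count d := by omega
  simp [pyComb, hc1, hc2]
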